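-- pv_equiv track=rewrite | github.com/jung-hankyo/STAge-ViT | DDPM/models/ViT3D/utils.py | decode_patch_order
-- ===== SOURCE A (Python) =====
-- def decode_patch_order(num, order = None):
--     if order is None:
--         order = []
--
--     if num % 2 == 0:
--         order.append(2)
--         num = num // 2
--         return decode_patch_order(num, order)
--     else:
--         if num % 3 == 0:
--             order.append(3)
--             num = num // 3
--             return decode_patch_order(num, order)
--         else:
--             if num != 1:
--                 order.append(num)
--             return order
-- ===== SOURCE B (Python) =====
-- def decode_patch_order(num, order=None):
--     if order is None:
--         order = []
--     twos = 0
--     while num % 2 == 0: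
--         num //= 2
--         twos += 1
--     threes = 0
--     while num % 3 == 0:
--         num //= 3
--         threes += 1
--     order.extend([2] * twos + [3] * threes)
--     if num != 1:
--         order.append(num)
--     return order
-- ===== Notes on version B (the rewrite author's own statement) =====
-- stated objective: simpler
-- what changed: Replaces the tail recursion that interleaves testing 2 and 3 at every step with two separate division loops that count the factors of 2 and then of 3, building the output with list multiplication at the end.
-- outside the precondition, e.g. on decode_patch_order(0, None): A raises RecursionError, B does not finish within the time limit
import Mathlib
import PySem

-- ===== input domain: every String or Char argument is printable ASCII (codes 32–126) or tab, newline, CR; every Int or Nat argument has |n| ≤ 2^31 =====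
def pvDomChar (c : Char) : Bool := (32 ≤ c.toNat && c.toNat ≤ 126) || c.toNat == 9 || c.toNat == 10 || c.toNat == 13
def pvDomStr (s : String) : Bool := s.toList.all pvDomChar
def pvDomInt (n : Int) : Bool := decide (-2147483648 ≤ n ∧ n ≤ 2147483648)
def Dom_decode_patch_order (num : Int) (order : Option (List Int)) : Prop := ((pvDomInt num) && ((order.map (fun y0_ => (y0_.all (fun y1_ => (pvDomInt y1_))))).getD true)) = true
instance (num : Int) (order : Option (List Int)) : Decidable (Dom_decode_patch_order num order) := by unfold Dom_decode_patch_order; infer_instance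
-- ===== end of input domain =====

-- B re-implements A's interleaved 2/3 tail recursion as two separate factor-counting
-- loops plus list multiplication (objective: simpler).  Both Pythons mutate a
-- caller-supplied `order` list in place; the equivalence proved here is about the
-- RETURN value only (B performs the same kind of in-place extension).

-- ===== PORT A =====
-- fuel = num.natAbs + 1 only makes the recursion total; for num ≠ 0 (Pre_) it never
-- runs out, so this is a step-for-step transliteration of A's recursion.
def pvGoA (fuel : Nat) (num : Int) (order : List Int) : List Int :=
  match fuel with
  | 0 => order
  | f + 1 =>
    if PySem.Int.mod num 2 = 0 then
      pvGoA f (PySem.Int.floordiv num 2) (order ++ [2])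
    else if PySem.Int.mod num 3 = 0 then
      pvGoA f (PySem.Int.floordiv num 3) (order ++ [3])
    else if num ≠ 1 then order ++ [num] else order

def decode_patch_order (num : Int) (order : Option (List Int)) : List Int :=
  pvGoA (num.natAbs + 1) num (order.getD [])

-- ===== PORT B =====
-- one while-loop of Source B: divide by p while divisible, counting; fuel for totality only
def pvStripFac (fuel : Nat) (p num : Int) (acc : Nat) : Nat × Int :=
  match fuel with
  | 0 => (acc, num)
  | f + 1 =>
    if PySem.Int.mod num p = 0 then pvStripFac f p (PySem.Int.floordiv num p) (acc + 1)
    else (acc, num)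

def decode_patch_order_alt (num : Int) (order : Option (List Int)) : List Int :=
  let order0 := order.getD []
  let r2 := pvStripFac (num.natAbs + 1) 2 num 0
  let r3 := pvStripFac (r2.2.natAbs + 1) 3 r2.2 0
  let order1 := order0 ++ (List.replicate r2.1 2 ++ List.replicate r3.1 3)
  if r3.2 ≠ 1 then order1 ++ [r3.2] else order1

-- ===== PRECONDITION & SPEC =====
-- Pre_ excludes exactly num = 0, on which A recurses forever (RecursionError) and B loops forever.
def Pre_decode_patch_order (num : Int) (order : Option (List Int)) : Prop := num ≠ 0
instance (num : Int) (order : Option (List Int)) : Decidable (Pre_decode_patch_order num order) := by unfold Pre_decode_patch_order; infer_instance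
def pvWitness_decode_patch_order : Int × Option (List Int) := (6, none)

def Spec_decode_patch_order (num : Int) (order : Option (List Int)) (out : List Int) : Prop := out = decode_patch_order_alt num order
instance (num : Int) (order : Option (List Int)) (out : List Int) : Decidable (Spec_decode_patch_order num order out) := by unfold Spec_decode_patch_order; infer_instance

-- ===== CLAIM (what is proved, stated in full; the proofs are below) =====
def Claim_equal_decode_patch_order : Prop := ∀ (num : Int) (order : Option (List Int)), Dom_decode_patch_order num order → Pre_decode_patch_order num order → Spec_decode_patch_order num order (decode_patch_order num order)

-- ===== LEMMAS AND PROOFS =====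

-- arithmetic facts about one division step (divisor 2 or 3)
lemma pv_step2 (num : Int) (h0 : num ≠ 0) (h2 : PySem.Int.mod num 2 = 0) :
    (PySem.Int.floordiv num 2).natAbs < num.natAbs ∧ PySem.Int.floordiv num 2 ≠ 0 := by
  rw [PySem.Int.floordiv_eq_ediv_of_pos (by norm_num)]
  rw [PySem.Int.mod_eq_emod_of_pos (by norm_num)] at h2
  omega

lemma pv_step3 (num : Int) (h0 : num ≠ 0) (h3 : PySem.Int.mod num 3 = 0) :
    (PySem.Int.floordiv num 3).natAbs < num.natAbs ∧ PySem.Int.floordiv num 3 ≠ 0 := by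
  rw [PySem.Int.floordiv_eq_ediv_of_pos (by norm_num)]
  rw [PySem.Int.mod_eq_emod_of_pos (by norm_num)] at h3
  omega

-- dividing an odd number by 3 keeps it odd
lemma pv_odd3 (num : Int) (h2 : PySem.Int.mod num 2 ≠ 0) (h3 : PySem.Int.mod num 3 = 0) :
    PySem.Int.mod (PySem.Int.floordiv num 3) 2 ≠ 0 := by
  rw [PySem.Int.floordiv_eq_ediv_of_pos (by norm_num),
      PySem.Int.mod_eq_emod_of_pos (by norm_num)]
  rw [PySem.Int.mod_eq_emod_of_pos (by norm_num)] at h2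
  rw [PySem.Int.mod_eq_emod_of_pos (by norm_num)] at h3
  omega

-- the common specification: the factor list A and B both produce (proof-only helper)
def pvSpecF (num : Int) : List Int :=
  if h : PySem.Int.mod num 2 = 0 ∧ num ≠ 0 then 2 :: pvSpecF (PySem.Int.floordiv num 2)
  else if h3 : PySem.Int.mod num 3 = 0 ∧ num ≠ 0 then 3 :: pvSpecF (PySem.Int.floordiv num 3)
  else if num ≠ 1 then [num] else []
termination_by num.natAbs
decreasing_by
  · exact (pv_step2 num h.2 h.1).1
  · exact (pv_step3 num h3.2 h3.1).1

lemma pv_rep_comm {α : Type} (n : Nat) (a : α) (l : List α) :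
    a :: (List.replicate n a ++ l) = List.replicate n a ++ a :: l := by
  induction n with
  | zero => simp
  | succ k ih => simp [List.replicate_succ, ih]

lemma pvSpecF_two (num : Int) (h0 : num ≠ 0) (h2 : PySem.Int.mod num 2 = 0) :
    pvSpecF num = 2 :: pvSpecF (PySem.Int.floordiv num 2) := by
  have hd : (2 : Int) ∣ num := (PySem.Int.mod_eq_zero_iff_dvd num 2).mp h2
  rw [pvSpecF]; simp [h0, hd]

lemma pvSpecF_three (num : Int) (h0 : num ≠ 0) (h2 : PySem.Int.mod num 2 ≠ 0)
    (h3 : PySem.Int.mod num 3 = 0) :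
    pvSpecF num = 3 :: pvSpecF (PySem.Int.floordiv num 3) := by
  have hd2 : ¬ (2 : Int) ∣ num := fun hd => h2 ((PySem.Int.mod_eq_zero_iff_dvd num 2).mpr hd)
  have hd3 : (3 : Int) ∣ num := (PySem.Int.mod_eq_zero_iff_dvd num 3).mp h3
  rw [pvSpecF]; simp [h0, hd2, hd3]

lemma pvSpecF_done (num : Int) (h2 : PySem.Int.mod num 2 ≠ 0) (h3 : PySem.Int.mod num 3 ≠ 0) :
    pvSpecF num = if num ≠ 1 then [num] else [] := by
  have hd2 : ¬ (2 : Int) ∣ num := fun hd => h2 ((PySem.Int.mod_eq_zero_iff_dvd num 2).mpr hd)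
  have hd3 : ¬ (3 : Int) ∣ num := fun hd => h3 ((PySem.Int.mod_eq_zero_iff_dvd num 3).mpr hd)
  rw [pvSpecF]; simp [hd2, hd3]

-- A's recursion computes order ++ pvSpecF num when the fuel suffices
lemma pvGoA_spec : ∀ (fuel : Nat) (num : Int) (order : List Int), num ≠ 0 →
    num.natAbs < fuel → pvGoA fuel num order = order ++ pvSpecF num := by
  intro fuel
  induction fuel with
  | zero => intro num order _ hf; omega
  | succ f ih =>
    intro num order h0 hf
    by_cases h2 : PySem.Int.mod num 2 = 0
    · have st := pv_step2 num h0 h2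
      simp only [pvGoA, h2, if_pos rfl, pvSpecF_two num h0 h2]
      rw [ih _ _ st.2 (by omega)]
      simp
    · by_cases h3 : PySem.Int.mod num 3 = 0
      · have st := pv_step3 num h0 h3
        simp only [pvGoA, h2, h3, if_neg, if_pos, pvSpecF_three num h0 h2 h3]
        rw [ih _ _ st.2 (by omega)]
        simp
      · simp only [pvGoA, h2, h3, if_neg, pvSpecF_done num h2 h3]
        split_ifs <;> simp_all

-- accumulator shift for pvStripFac
lemma pvStripFac_acc : ∀ (fuel : Nat) (p num : Int) (acc : Nat),
    pvStripFac fuel p num acc = ((pvStripFac fuel p num 0).1 + acc, (pvStripFac fuel p num 0).2) := by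
  intro fuel
  induction fuel with
  | zero => intro p num acc; simp [pvStripFac]
  | succ f ih =>
    intro p num acc
    by_cases h : PySem.Int.mod num p = 0
    · simp only [pvStripFac, h, if_pos rfl]
      rw [ih p _ (acc + 1), ih p _ (0 + 1)]
      simp [Prod.ext_iff]; omega
    · simp [pvStripFac, h]

-- the 2-stripping loop: what it leaves, and that pvSpecF factors through it
lemma pvStrip2 : ∀ (fuel : Nat) (num : Int), num ≠ 0 → num.natAbs < fuel →
    pvSpecF num = List.replicate (pvStripFac fuel 2 num 0).1 2 ++ pvSpecF (pvStripFac fuel 2 num 0).2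
    ∧ (pvStripFac fuel 2 num 0).2 ≠ 0 ∧ PySem.Int.mod (pvStripFac fuel 2 num 0).2 2 ≠ 0 := by
  intro fuel
  induction fuel with
  | zero => intro num _ hf; omega
  | succ f ih =>
    intro num h0 hf
    by_cases h2 : PySem.Int.mod num 2 = 0
    · have st := pv_step2 num h0 h2
      have hrec := ih (PySem.Int.floordiv num 2) st.2 (by omega)
      simp only [pvStripFac, h2, if_pos rfl]
      rw [pvStripFac_acc f 2 (PySem.Int.floordiv num 2) (0 + 1)]
      refine ⟨?_, hrec.2.1, hrec.2.2⟩
      rw [pvSpecF_two num h0 h2, hrec.1, pv_rep_comm]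
      simp [List.replicate_succ', List.append_assoc]
    · simp only [pvStripFac, h2, if_neg (by exact h2)]
      exact ⟨by simp, h0, h2⟩

-- the 3-stripping loop on an odd number
lemma pvStrip3 : ∀ (fuel : Nat) (num : Int), num ≠ 0 → PySem.Int.mod num 2 ≠ 0 →
    num.natAbs < fuel →
    pvSpecF num = List.replicate (pvStripFac fuel 3 num 0).1 3 ++ pvSpecF (pvStripFac fuel 3 num 0).2
    ∧ (pvStripFac fuel 3 num 0).2 ≠ 0 ∧ PySem.Int.mod (pvStripFac fuel 3 num 0).2 2 ≠ 0
    ∧ PySem.Int.mod (pvStripFac fuel 3 num 0).2 3 ≠ 0 := by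
  intro fuel
  induction fuel with
  | zero => intro num _ _ hf; omega
  | succ f ih =>
    intro num h0 h2 hf
    by_cases h3 : PySem.Int.mod num 3 = 0
    · have st := pv_step3 num h0 h3
      have hodd := pv_odd3 num h2 h3
      have hrec := ih (PySem.Int.floordiv num 3) st.2 hodd (by omega)
      simp only [pvStripFac, h3, if_pos rfl]
      rw [pvStripFac_acc f 3 (PySem.Int.floordiv num 3) (0 + 1)]
      refine ⟨?_, hrec.2.1, hrec.2.2.1, hrec.2.2.2⟩
      rw [pvSpecF_three num h0 h2 h3, hrec.1, pv_rep_comm]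
      simp [List.replicate_succ', List.append_assoc]
    · simp only [pvStripFac, h3, if_neg (by exact h3)]
      exact ⟨by simp, h0, h2, h3⟩

-- ===== VERDICT (by name: the statement is the Claim_ definition above) =====
theorem decode_patch_order_spec : Claim_equal_decode_patch_order := by
  intro num order _ h0
  unfold Spec_decode_patch_order decode_patch_order decode_patch_order_alt
  obtain ⟨hA1, hn1, ho1⟩ := pvStrip2 (num.natAbs + 1) num h0 (by omega)
  obtain ⟨hB1, hn2, ho2, ho3⟩ :=
    pvStrip3 ((pvStripFac (num.natAbs + 1) 2 num 0).2.natAbs + 1) _ hn1 ho1 (by omega)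
  rw [pvGoA_spec (num.natAbs + 1) num (order.getD []) h0 (by omega), hA1, hB1,
      pvSpecF_done _ ho2 ho3]
  split_ifs with h <;> simp_all [List.append_assoc]
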